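-- pv_equiv track=rewrite | github.com/TamotsuTokazu/CSE202 | 4.py | poly_eq
-- ===== SOURCE A (Python) =====
-- def poly_eq(a, b):
--     if len(a) < len(b):
--         a, b = b, a
--     for i in range(len(a)):
--         t = b[i] if i < len(b) else 0
--         if a[i] != t:
--             return False
--     return True
-- ===== SOURCE B (Python) =====
-- def _trim(p):
--     i = len(p)
--     while i > 0 and p[i - 1] == 0:
--         i -= 1
--     return p[:i]
--
-- def poly_eq(a, b):
--     return _trim(a) == _trim(b)
-- ===== Notes on version B (the rewrite author's own statement) =====
-- stated objective: simpler
-- what changed: Instead of zero-padding the shorter list and comparing position by position in one loop, B trims trailing zeros from each list to a canonical form and compares the two trimmed lists for equality.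
import Mathlib
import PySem

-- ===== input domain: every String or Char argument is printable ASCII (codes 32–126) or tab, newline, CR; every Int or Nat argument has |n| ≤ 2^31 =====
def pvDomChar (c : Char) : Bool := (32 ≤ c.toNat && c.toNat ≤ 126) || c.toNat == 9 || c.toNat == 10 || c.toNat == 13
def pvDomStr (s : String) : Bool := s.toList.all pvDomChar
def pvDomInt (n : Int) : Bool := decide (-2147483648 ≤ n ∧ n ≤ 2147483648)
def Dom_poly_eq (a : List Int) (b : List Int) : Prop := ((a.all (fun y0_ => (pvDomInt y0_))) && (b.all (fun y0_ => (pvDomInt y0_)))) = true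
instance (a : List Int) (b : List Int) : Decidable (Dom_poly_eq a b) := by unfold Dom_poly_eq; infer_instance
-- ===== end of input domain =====

-- B trims trailing zeros from both coefficient lists and compares the canonical forms;
-- A zero-pads the shorter list and compares position by position in one loop.

-- ===== PORT A =====
-- the 'for i in range(len(a))' loop with early return False, after the swap ensuring len(a) ≥ len(b)
def polyEqGo (a b : List Int) (i : Nat) : Bool :=
  if i < a.length then
    let t := if i < b.length then b.getD i 0 else 0
    if a.getD i 0 ≠ t then false else polyEqGo a b (i + 1)
  else true
termination_by a.length - i

def poly_eq (a : List Int) (b : List Int) : Bool :=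
  if a.length < b.length then polyEqGo b a 0 else polyEqGo a b 0

-- ===== PORT B =====
-- the 'while i > 0 and p[i-1] == 0: i -= 1' loop of _trim
def trimLen (p : List Int) (i : Nat) : Nat :=
  if i > 0 ∧ p.getD (i - 1) 0 == 0 then trimLen p (i - 1) else i

def trim (p : List Int) : List Int := p.take (trimLen p p.length)

def poly_eq_alt (a : List Int) (b : List Int) : Bool := trim a == trim b

-- ===== PRECONDITION & SPEC =====
def Spec_poly_eq (a : List Int) (b : List Int) (out : Bool) : Prop := out = poly_eq_alt a b
instance (a : List Int) (b : List Int) (out : Bool) : Decidable (Spec_poly_eq a b out) := by unfold Spec_poly_eq; infer_instance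

-- ===== CLAIM (what is proved, stated in full; the proofs are below) =====
def Claim_equal_poly_eq : Prop := ∀ (a : List Int) (b : List Int), Dom_poly_eq a b → Spec_poly_eq a b (poly_eq a b)

-- ===== LEMMAS AND PROOFS =====

-- "zero-extended pointwise equality": the semantic content both programs decide
def PtEq (a b : List Int) : Prop := ∀ j : Nat, a.getD j 0 = b.getD j 0

theorem go_iff (n : Nat) (a b : List Int) (i : Nat) (hn : a.length - i = n) :
    polyEqGo a b i = true ↔ ∀ j, i ≤ j → j < a.length → a.getD j 0 = b.getD j 0 := by
  induction n generalizing i with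
  | zero =>
    rw [polyEqGo]
    have : ¬ i < a.length := by omega
    simp [this]
    intro j h1 h2; omega
  | succ n ih =>
    rw [polyEqGo]
    by_cases h : i < a.length
    · have ht : (if i < b.length then b.getD i 0 else 0) = b.getD i 0 := by
        split
        · rfl
        · rw [List.getD_eq_default]; omega
      simp only [h, if_true, ht]
      by_cases he : a.getD i 0 = b.getD i 0
      · simp only [he, ne_eq, not_true_eq_false, if_neg, not_false_eq_true]
        rw [ih (i + 1) (by omega)]
        constructor
        · intro hall j h1 h2
          rcases Nat.eq_or_lt_of_le h1 with rfl | hlt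
          · exact he
          · exact hall j hlt h2
        · intro hall j h1 h2; exact hall j (by omega) h2
      · simp only [he, ne_eq, not_false_eq_true, if_true]
        constructor
        · intro hf; exact absurd hf (by simp)
        · intro hall; exact absurd (hall i le_rfl h) he
    · have : ¬ i < a.length := h
      simp [this]
      intro j h1 h2; omega

theorem polyEqGo_iff (a b : List Int) (hlen : b.length ≤ a.length) :
    polyEqGo a b 0 = true ↔ PtEq a b := by
  rw [go_iff (a.length) a b 0 (by omega)]
  constructor
  · intro h j
    by_cases hj : j < a.length
    · exact h j (Nat.zero_le _) hj
    · rw [List.getD_eq_default, List.getD_eq_default] <;> omega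
  · intro h j _ _; exact h j

theorem trimLen_le (p : List Int) (i : Nat) : trimLen p i ≤ i := by
  induction i using Nat.strong_induction_on with
  | _ i ih =>
    rw [trimLen]
    split
    · rename_i h
      exact le_trans (ih (i - 1) (by omega)) (by omega)
    · exact le_rfl

theorem trimLen_zeros (p : List Int) (i : Nat) :
    ∀ j, trimLen p i ≤ j → j < i → p.getD j 0 = 0 := by
  induction i using Nat.strong_induction_on with
  | _ i ih =>
    rw [trimLen]
    split
    · rename_i h
      intro j h1 h2
      rcases Nat.lt_or_ge j (i - 1) with hj | hj
      · exact ih (i - 1) (by omega) j h1 hj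
      · have : j = i - 1 := by omega
        subst this
        simpa using h.2
    · intro j h1 h2; omega

theorem trimLen_last (p : List Int) (i : Nat) :
    trimLen p i = 0 ∨ p.getD (trimLen p i - 1) 0 ≠ 0 := by
  induction i using Nat.strong_induction_on with
  | _ i ih =>
    rw [trimLen]
    split
    · rename_i h
      exact ih (i - 1) (by omega)
    · rename_i h
      by_cases hz : i = 0
      · left; exact hz
      · right
        intro hc
        exact h ⟨by omega, by simpa using hc⟩

theorem trim_getD (p : List Int) (j : Nat) : (trim p).getD j 0 = p.getD j 0 := by
  unfold trim
  by_cases hj : j < trimLen p p.length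
  · have hlt : j < p.length := lt_of_lt_of_le hj (trimLen_le p p.length)
    rw [List.getD_eq_getElem?_getD, List.getD_eq_getElem?_getD,
        List.getElem?_take_of_lt hj]
  · rw [List.getD_eq_default _ _ (by simp; omega)]
    by_cases hl : j < p.length
    · exact (trimLen_zeros p p.length j (by omega) hl).symm
    · rw [List.getD_eq_default _ _ (by omega)]

theorem trim_noTrail (p : List Int) :
    trim p = [] ∨ (trim p).getD ((trim p).length - 1) 0 ≠ 0 := by
  rcases trimLen_last p p.length with h | h
  · left; unfold trim; rw [h]; simp
  · right
    have hlen : (trim p).length = trimLen p p.length := by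
      unfold trim
      simp [Nat.min_eq_left (trimLen_le p p.length)]
    rw [hlen, trim_getD]
    exact h

theorem ext_of_ptEq :
    ∀ (x y : List Int),
      (x = [] ∨ x.getD (x.length - 1) 0 ≠ 0) →
      (y = [] ∨ y.getD (y.length - 1) 0 ≠ 0) →
      PtEq x y → x = y := by
  intro x
  induction x with
  | nil =>
    intro y _ hy hpt
    rcases hy with rfl | hy
    · rfl
    · exfalso
      apply hy
      rw [← hpt (y.length - 1)]
      simp
  | cons hx tx ih =>
    intro y hxt hy hpt
    rcases hxt with h | hxt
    · exact absurd h (by simp)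
    cases y with
    | nil =>
      exfalso
      apply hxt
      exact hpt ((hx :: tx).length - 1)
    | cons hy' ty =>
      have hhead : hx = hy' := by simpa using hpt 0
      have htail : tx = ty := by
        apply ih
        · cases tx with
          | nil => left; rfl
          | cons a t =>
            right
            simpa using hxt
        · cases ty with
          | nil => left; rfl
          | cons a t =>
            rcases hy with h | h
            · exact absurd h (by simp)
            · right; simpa using h
        · intro j; simpa using hpt (j + 1)
      rw [hhead, htail]
theorem trim_eq_iff (a b : List Int) : trim a = trim b ↔ PtEq a b := by
  constructor
  · intro h j
    rw [← trim_getD a j, ← trim_getD b j, h]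
  · intro h
    exact ext_of_ptEq _ _ (trim_noTrail a) (trim_noTrail b)
      (fun j => by rw [trim_getD, trim_getD]; exact h j)

theorem ptEq_symm (a b : List Int) : PtEq a b ↔ PtEq b a :=
  ⟨fun h j => (h j).symm, fun h j => (h j).symm⟩

theorem poly_eq_iff (a b : List Int) : poly_eq a b = true ↔ PtEq a b := by
  unfold poly_eq
  split
  · rename_i h
    rw [polyEqGo_iff b a (by omega), ptEq_symm]
  · rename_i h
    exact polyEqGo_iff a b (by omega)

-- ===== VERDICT (by name: the statement is the Claim_ definition above) =====
theorem poly_eq_spec : Claim_equal_poly_eq := by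
  intro a b _
  unfold Spec_poly_eq poly_eq_alt
  rw [Bool.eq_iff_iff, poly_eq_iff, beq_iff_eq, trim_eq_iff]
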